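-- pv_equiv track=rewrite | github.com/ryandavis3/leetcode | candy/candy.py | candyTwoArrays
-- ===== SOURCE A (Python) =====
-- from typing import List
--
-- def candyTwoArrays(ratings: List[int]):
--     """
--     Use two arrays with left (right) passes to find minimum
--     number of candies.
--     """
--     # Left to right pass
--     L = len(ratings)
--     left = [1] * L
--     for i in range(1, L):
--         if ratings[i] > ratings[i-1]:
--             left[i] = left[i-1] + 1
--     # Right to left pass
--     right = [1] * L
--     for i in range(L-1, 0, -1):
--         if ratings[i-1] > ratings[i]:
--             right[i-1] = right[i] + 1
--     # Combine right and left passes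
--     combined = [max(left[i], right[i]) for i in range(L)]
--     # Compute total number of candies
--     return sum(combined)
-- ===== SOURCE B (Python) =====
-- from typing import List
--
-- def candyTwoArrays(ratings: List[int]):
--     """
--     Single forward pass, O(1) extra space: track the current increasing
--     streak (up), decreasing streak (down) and the up-streak at the last
--     peak; on each decrease add the retroactive candies directly.
--     """
--     if not ratings:
--         return 0
--     total = 1
--     up = down = peak = 0
--     prev = ratings[0]
--     for cur in ratings[1:]:
--         if cur > prev:
--             up += 1
--             down = 0
--             peak = up
--             total += 1 + up
--         elif cur == prev:
--             up = down = peak = 0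
--             total += 1
--         else:
--             up = 0
--             down += 1
--             total += down + (1 if down > peak else 0)
--         prev = cur
--     return total
-- ===== Notes on version B (the rewrite author's own statement) =====
-- stated objective: faster
-- what changed: Replaced the two-array left/right DP (three passes, three O(n) arrays) with a single forward slope-counting pass in O(1) extra space that tracks the current increasing/decreasing streaks and the last peak and adds retroactive candies directly.
import Mathlib
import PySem

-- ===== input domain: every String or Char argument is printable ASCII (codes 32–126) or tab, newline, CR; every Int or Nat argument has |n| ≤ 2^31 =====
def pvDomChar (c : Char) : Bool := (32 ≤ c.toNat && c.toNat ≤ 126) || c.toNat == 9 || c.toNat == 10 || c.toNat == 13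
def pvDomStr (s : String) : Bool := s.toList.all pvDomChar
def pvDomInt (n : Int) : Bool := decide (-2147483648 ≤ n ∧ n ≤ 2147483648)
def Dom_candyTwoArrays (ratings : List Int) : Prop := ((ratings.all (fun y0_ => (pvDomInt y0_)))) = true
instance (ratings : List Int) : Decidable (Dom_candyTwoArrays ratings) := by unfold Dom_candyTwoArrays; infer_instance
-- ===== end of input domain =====

-- B replaces A's three passes over three O(n) arrays by a single forward
-- slope-counting pass in O(1) extra space (same return value; measured faster by a constant factor).

-- ===== PORT A =====
-- literal port of A: left pass, right pass, combine, sum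
def candyTwoArrays (ratings : List Int) : Int :=
  let L : Int := (ratings.length : Int)
  let left : List Int := List.replicate ratings.length 1
  let left := (PySem.List.pyRange 1 L 1).foldl (fun lf i =>
      if PySem.List.pyGetD ratings i 0 > PySem.List.pyGetD ratings (i-1) 0 then
        PySem.List.pySetD lf i (PySem.List.pyGetD lf (i-1) 0 + 1)
      else lf) left
  let right : List Int := List.replicate ratings.length 1
  let right := (PySem.List.pyRange (L-1) 0 (-1)).foldl (fun rt i =>
      if PySem.List.pyGetD ratings (i-1) 0 > PySem.List.pyGetD ratings i 0 then
        PySem.List.pySetD rt (i-1) (PySem.List.pyGetD rt i 0 + 1)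
      else rt) right
  let combined := (PySem.List.pyRange 0 L 1).map (fun i =>
      max (PySem.List.pyGetD left i 0) (PySem.List.pyGetD right i 0))
  combined.sum

-- ===== PORT B =====
-- literal port of B's loop over ratings[1:] with state (up, down, peak, total)
def goB : Int → List Int → Int → Int → Int → Int → Int
  | _, [], _, _, _, total => total
  | prev, cur :: rest, up, down, peak, total =>
    if cur > prev then
      goB cur rest (up + 1) 0 (up + 1) (total + 1 + (up + 1))
    else if cur = prev then
      goB cur rest 0 0 0 (total + 1)
    else
      goB cur rest 0 (down + 1) peak
        (total + (down + 1) + (if down + 1 > peak then 1 else 0))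

def candyTwoArrays_alt (ratings : List Int) : Int :=
  match ratings with
  | [] => 0
  | x :: rest => goB x rest 0 0 0 1

-- ===== PRECONDITION & SPEC =====
def Spec_candyTwoArrays (ratings : List Int) (out : Int) : Prop := out = candyTwoArrays_alt ratings
instance (ratings : List Int) (out : Int) : Decidable (Spec_candyTwoArrays ratings out) := by unfold Spec_candyTwoArrays; infer_instance

-- ===== CLAIM (what is proved, stated in full; the proofs are below) =====
def Claim_equal_candyTwoArrays : Prop := ∀ (ratings : List Int), Dom_candyTwoArrays ratings → Spec_candyTwoArrays ratings (candyTwoArrays ratings)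

-- ===== LEMMAS AND PROOFS =====

-- d-value of the head: length of the maximal strictly decreasing prefix run
def dHead : List Int → Int
  | [] => 0
  | [_] => 1
  | z :: w :: q => if z > w then dHead (w :: q) + 1 else 1

-- ground truth: sum over the list of max(u_i, d_i); u computed forward from
-- context (previous element value, its u-value c), d from the suffix
def SM : Int → Int → List Int → Int
  | _, _, [] => 0
  | prev, c, z :: q =>
      max (if z > prev then c + 1 else 1) (dHead (z :: q)) + SM z (if z > prev then c + 1 else 1) q

def T (xs : List Int) : Int := match xs with | [] => 0 | x :: _ => SM x 0 xs

-- last element (0 for [])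
def lastD : List Int → Int
  | [] => 0
  | [z] => z
  | _ :: w :: q => lastD (w :: q)

-- strictly decreasing?
def sdec : List Int → Bool
  | [] => true
  | [_] => true
  | z :: w :: q => decide (z > w) && sdec (w :: q)

-- number of edges of the maximal strictly decreasing suffix run
def rdown : List Int → Int
  | [] => 0
  | [_] => 0
  | z :: w :: q => if z > w ∧ sdec (w :: q) = true then ((w :: q).length : Int) else rdown (w :: q)

-- u-value of the last element (c for [])
def uLastF : Int → Int → List Int → Int
  | _, c, [] => c
  | prev, c, z :: q => uLastF z (if z > prev then c + 1 else 1) q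

-- u-value of the top element of the trailing strictly decreasing run
def utop : Int → Int → List Int → Int
  | _, c, [] => c
  | prev, c, z :: q =>
      if sdec (z :: q) = true then (if z > prev then c + 1 else 1)
      else utop z (if z > prev then c + 1 else 1) q

-- forward list of u-values / list of d-values
def Ulist : Int → Int → List Int → List Int
  | _, _, [] => []
  | prev, c, z :: q => (if z > prev then c + 1 else 1) :: Ulist z (if z > prev then c + 1 else 1) q

def Dlist : List Int → List Int
  | [] => []
  | z :: q => dHead (z :: q) :: Dlist q

theorem sM_eq_zip (l : List Int) : ∀ prev c, SM prev c l = (List.zipWith max (Ulist prev c l) (Dlist l)).sum := by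
  induction l with
  | nil => intro prev c; simp [SM, Ulist, Dlist]
  | cons z q ih => intro prev c; simp [SM, Ulist, Dlist, ih]

theorem lastD_snoc (q : List Int) : ∀ z y, lastD (z :: (q ++ [y])) = y := by
  induction q with
  | nil => intro z y; rfl
  | cons w q' ih => intro z y; exact ih w y

theorem sdec_append (q : List Int) : ∀ z y,
    sdec (z :: (q ++ [y])) = (sdec (z :: q) && decide (lastD (z :: q) > y)) := by
  induction q with
  | nil => intro z y; simp [sdec, lastD]
  | cons w q' ih =>
    intro z y
    simp only [List.cons_append]
    rw [show sdec (z :: w :: (q' ++ [y])) = (decide (z > w) && sdec (w :: (q' ++ [y]))) from rfl]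
    rw [ih w y]
    rw [show sdec (z :: w :: q') = (decide (z > w) && sdec (w :: q')) from rfl,
        show lastD (z :: w :: q') = lastD (w :: q') from rfl]
    try rw [Bool.and_assoc]

theorem dHead_sdec (q : List Int) : ∀ z, sdec (z :: q) = true → dHead (z :: q) = (q.length : Int) + 1 := by
  induction q with
  | nil => intro z _; simp [dHead]
  | cons w q' ih =>
    intro z h
    simp only [sdec, Bool.and_eq_true, decide_eq_true_eq] at h
    simp [dHead, h.1, ih w h.2]

theorem dHead_append (q : List Int) : ∀ z y,
    dHead (z :: (q ++ [y])) =
      (if sdec (z :: q) = true ∧ lastD (z :: q) > y then dHead (z :: q) + 1 else dHead (z :: q)) := by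
  induction q with
  | nil =>
    intro z y
    by_cases h : z > y <;> simp [dHead, sdec, lastD, h]
  | cons w q' ih =>
    intro z y
    simp only [List.cons_append]
    rw [show dHead (z :: w :: (q' ++ [y])) =
        (if z > w then dHead (w :: (q' ++ [y])) + 1 else 1) from rfl]
    rw [ih w y]
    have hsd : sdec (z :: w :: q') = (decide (z > w) && sdec (w :: q')) := rfl
    by_cases hzw : z > w <;> by_cases hS : sdec (w :: q') = true <;>
      by_cases hL : lastD (w :: q') > y <;>
      simp [dHead, lastD, hsd, hzw, hS, hL]

theorem rdown_sdec (q : List Int) : ∀ z, sdec (z :: q) = true → rdown (z :: q) = (q.length : Int) := by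
  induction q with
  | nil => intro z _; simp [rdown]
  | cons w q' ih =>
    intro z h
    simp only [sdec, Bool.and_eq_true, decide_eq_true_eq] at h
    simp [rdown, h.1, h.2]

theorem rdown_append (q : List Int) : ∀ z y,
    rdown (z :: (q ++ [y])) = (if lastD (z :: q) > y then rdown (z :: q) + 1 else 0) := by
  induction q with
  | nil =>
    intro z y
    by_cases h : z > y <;> simp [rdown, sdec, lastD, h]
  | cons w q' ih =>
    intro z y
    simp only [List.cons_append]
    rw [show rdown (z :: w :: (q' ++ [y])) =
        (if z > w ∧ sdec (w :: (q' ++ [y])) = true then (((w :: (q' ++ [y])).length : Nat) : Int)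
         else rdown (w :: (q' ++ [y]))) from rfl]
    have hs := sdec_append q' w y
    rw [hs, ih w y]
    rw [show rdown (z :: w :: q') =
        (if z > w ∧ sdec (w :: q') = true then (((w :: q').length : Nat) : Int)
         else rdown (w :: q')) from rfl,
        show lastD (z :: w :: q') = lastD (w :: q') from rfl]
    by_cases hzw : z > w <;> by_cases hS : sdec (w :: q') = true <;>
      by_cases hL : lastD (w :: q') > y <;>
      simp [hzw, hS, hL, rdown_sdec q' w, List.length_cons, List.length_append]

theorem uLastF_append (q : List Int) : ∀ prev c z y,
    uLastF prev c (z :: (q ++ [y])) =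
      (if y > lastD (z :: q) then uLastF prev c (z :: q) + 1 else 1) := by
  induction q with
  | nil => intro prev c z y; by_cases h : y > z <;> simp [uLastF, lastD, h]
  | cons w q' ih =>
    intro prev c z y
    simp only [List.cons_append]
    rw [show uLastF prev c (z :: w :: (q' ++ [y])) =
        uLastF z (if z > prev then c + 1 else 1) (w :: (q' ++ [y])) from rfl]
    rw [ih z (if z > prev then c + 1 else 1) w y]
    rfl

theorem utop_append (q : List Int) : ∀ prev c z y,
    utop prev c (z :: (q ++ [y])) =
      (if lastD (z :: q) > y then utop prev c (z :: q)
       else if y > lastD (z :: q) then uLastF prev c (z :: q) + 1 else 1) := by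
  induction q with
  | nil =>
    intro prev c z y
    by_cases h1 : z > y <;> by_cases h2 : y > z <;>
      simp [utop, uLastF, sdec, lastD, h1, h2]
  | cons w q' ih =>
    intro prev c z y
    simp only [List.cons_append]
    rw [show utop prev c (z :: w :: (q' ++ [y])) =
        (if sdec (z :: w :: (q' ++ [y])) = true then (if z > prev then c + 1 else 1)
         else utop z (if z > prev then c + 1 else 1) (w :: (q' ++ [y]))) from rfl]
    have hs : sdec (z :: w :: (q' ++ [y])) = (sdec (z :: w :: q') && decide (lastD (z :: w :: q') > y)) := by
      have h0 := sdec_append (w :: q') z y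
      simpa only [List.cons_append] using h0
    rw [hs, ih z (if z > prev then c + 1 else 1) w y]
    have hsd : sdec (z :: w :: q') = (decide (z > w) && sdec (w :: q')) := rfl
    rw [show utop prev c (z :: w :: q') =
        (if sdec (z :: w :: q') = true then (if z > prev then c + 1 else 1)
         else utop z (if z > prev then c + 1 else 1) (w :: q')) from rfl,
        show lastD (z :: w :: q') = lastD (w :: q') from rfl,
        show uLastF prev c (z :: w :: q') = uLastF z (if z > prev then c + 1 else 1) (w :: q') from rfl]
    by_cases hS : sdec (w :: q') = true <;> by_cases hL : lastD (w :: q') > y <;>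
      by_cases hyL : y > lastD (w :: q') <;>
      simp [hsd, hS, hL, hyL]

theorem uLastF_pos (q : List Int) : ∀ prev c z, (0:Int) ≤ c → 1 ≤ uLastF prev c (z :: q) := by
  induction q with
  | nil => intro prev c z hc; by_cases h : z > prev <;> simp [uLastF, h] <;> omega
  | cons w q' ih =>
    intro prev c z hc
    rw [show uLastF prev c (z :: w :: q') = uLastF z (if z > prev then c + 1 else 1) (w :: q') from rfl]
    exact ih z _ w (by split <;> omega)

theorem utop_pos (q : List Int) : ∀ prev c z, (0:Int) ≤ c → 1 ≤ utop prev c (z :: q) := by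
  induction q with
  | nil => intro prev c z hc; simp [utop, sdec]; split <;> omega
  | cons w q' ih =>
    intro prev c z hc
    rw [show utop prev c (z :: w :: q') =
        (if sdec (z :: w :: q') = true then (if z > prev then c + 1 else 1)
         else utop z (if z > prev then c + 1 else 1) (w :: q')) from rfl]
    split
    · split <;> omega
    · exact ih z _ w (by split <;> omega)

theorem dHead_pos (q : List Int) : ∀ z, (1:Int) ≤ dHead (z :: q) := by
  induction q with
  | nil => intro z; simp [dHead]
  | cons w q' ih =>
    intro z
    rw [show dHead (z :: w :: q') = (if z > w then dHead (w :: q') + 1 else 1) from rfl]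
    have := ih w
    split <;> omega

-- the single-step append law for the ground truth (heart of the slope-counting proof)
theorem sM_step (q : List Int) : ∀ z prev c y, (0:Int) ≤ c →
    SM prev c (z :: (q ++ [y])) = SM prev c (z :: q) +
      (if lastD (z :: q) > y then
          rdown (z :: q) + 1 + (if rdown (z :: q) + 2 > utop prev c (z :: q) then 1 else 0)
       else if y > lastD (z :: q) then uLastF prev c (z :: q) + 1
       else 1) := by
  induction q with
  | nil =>
    intro z prev c y hc
    by_cases h1 : z > prev <;> by_cases h2 : z > y <;> by_cases h3 : y > z <;>
      simp [SM, dHead, lastD, rdown, utop, uLastF, sdec, max_def, h1, h2, h3] <;> omega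
  | cons w q' ih =>
    intro z prev c y hc
    simp only [List.cons_append]
    have hu : (0:Int) ≤ (if z > prev then c + 1 else 1) := by split <;> omega
    have hB := ih w z (if z > prev then c + 1 else 1) y hu
    have hA := dHead_append q' w y
    have hW1 := uLastF_pos q' z (if z > prev then c + 1 else 1) w hu
    have hUT := utop_pos q' z (if z > prev then c + 1 else 1) w hu
    have hDH := dHead_pos q' w
    rw [show SM prev c (z :: w :: (q' ++ [y])) =
        max (if z > prev then c + 1 else 1) (dHead (z :: w :: (q' ++ [y]))) +
          SM z (if z > prev then c + 1 else 1) (w :: (q' ++ [y])) from rfl]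
    rw [show SM prev c (z :: w :: q') =
        max (if z > prev then c + 1 else 1) (dHead (z :: w :: q')) +
          SM z (if z > prev then c + 1 else 1) (w :: q') from rfl]
    rw [hB]
    rw [show dHead (z :: w :: (q' ++ [y])) =
        (if z > w then dHead (w :: (q' ++ [y])) + 1 else 1) from rfl]
    rw [hA]
    rw [show dHead (z :: w :: q') = (if z > w then dHead (w :: q') + 1 else 1) from rfl]
    rw [show lastD (z :: w :: q') = lastD (w :: q') from rfl]
    rw [show uLastF prev c (z :: w :: q') =
        uLastF z (if z > prev then c + 1 else 1) (w :: q') from rfl]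
    rw [show rdown (z :: w :: q') =
        (if z > w ∧ sdec (w :: q') = true then (((w :: q').length : Nat) : Int)
         else rdown (w :: q')) from rfl]
    rw [show utop prev c (z :: w :: q') =
        (if sdec (z :: w :: q') = true then (if z > prev then c + 1 else 1)
         else utop z (if z > prev then c + 1 else 1) (w :: q')) from rfl]
    have hsd : sdec (z :: w :: q') = (decide (z > w) && sdec (w :: q')) := rfl
    by_cases hzw : z > w <;> by_cases hwz : w > z <;> by_cases hS : sdec (w :: q') = true <;>
      by_cases hL : lastD (w :: q') > y <;> by_cases hyL : y > lastD (w :: q') <;>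
      simp [hsd, hzw, hwz, hS, hL, hyL, utop, uLastF, dHead_sdec q' w, rdown_sdec q' w,
            List.length_cons] <;>
      omega

-- B's loop preserves the ground truth, with state (up, down, peak) tied to the prefix
theorem goB_invariant (t : List Int) : ∀ (z : Int) (q : List Int),
    goB (lastD (z :: q)) t (uLastF z 0 (z :: q) - 1) (rdown (z :: q)) (utop z 0 (z :: q) - 1)
        (SM z 0 (z :: q)) = SM z 0 (z :: (q ++ t)) := by
  induction t with
  | nil => intro z q; simp [goB]
  | cons y t' ih =>
    intro z q
    have hstep := sM_step q z z 0 y (by norm_num)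
    have e1 := uLastF_append q z 0 z y
    have e2 := rdown_append q z y
    have e3 := utop_append q z 0 z y
    have elast := lastD_snoc q z y
    have ih' := ih z (q ++ [y])
    simp only [List.append_assoc, List.singleton_append] at ih'
    rw [elast] at ih'
    simp only [goB]
    rcases lt_trichotomy y (lastD (z :: q)) with hy | hy | hy
    · -- decrease step
      rw [if_pos hy] at hstep
      rw [if_neg (by omega)] at e1
      rw [if_pos hy] at e2
      rw [if_pos hy] at e3
      rw [if_neg (show ¬ y > lastD (z :: q) by omega), if_neg (show ¬ y = lastD (z :: q) by omega)]
      rw [e1, e2, e3, hstep] at ih'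
      rw [show (1:Int) - 1 = 0 from by norm_num] at ih'
      have harg : SM z 0 (z :: q) + (rdown (z :: q) + 1) +
            (if rdown (z :: q) + 1 > utop z 0 (z :: q) - 1 then 1 else 0) =
          SM z 0 (z :: q) +
            (rdown (z :: q) + 1 + if rdown (z :: q) + 2 > utop z 0 (z :: q) then 1 else 0) := by
        split_ifs <;> omega
      rw [harg]
      exact ih'
    · -- equal step
      rw [if_neg (by omega), if_neg (by omega)] at hstep
      rw [if_neg (by omega)] at e1
      rw [if_neg (by omega)] at e2
      rw [if_neg (by omega), if_neg (by omega)] at e3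
      rw [if_neg (show ¬ y > lastD (z :: q) by omega), if_pos hy]
      rw [e1, e2, e3, hstep] at ih'
      simpa using ih'
    · -- increase step
      rw [if_neg (by omega), if_pos hy] at hstep
      rw [if_pos hy] at e1
      rw [if_neg (by omega)] at e2
      rw [if_neg (by omega), if_pos hy] at e3
      rw [if_pos hy]
      rw [e1, e2, e3, hstep] at ih'
      have h1 : uLastF z 0 (z :: q) + 1 - 1 = uLastF z 0 (z :: q) - 1 + 1 := by omega
      have h2 : SM z 0 (z :: q) + (uLastF z 0 (z :: q) + 1) =
          SM z 0 (z :: q) + 1 + (uLastF z 0 (z :: q) - 1 + 1) := by omega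
      rw [h1, h2] at ih'
      exact ih'

theorem alt_eq_T (xs : List Int) : candyTwoArrays_alt xs = T xs := by
  cases xs with
  | nil => rfl
  | cons x t =>
    have h := goB_invariant t x []
    simp only [List.nil_append] at h
    rw [show lastD [x] = x from rfl, show uLastF x 0 [x] = 1 from by simp [uLastF],
        show rdown [x] = 0 from rfl, show utop x 0 [x] = 1 from by simp [utop, sdec],
        show SM x 0 [x] = 1 from by simp [SM, dHead]] at h
    norm_num at h
    simpa [candyTwoArrays_alt, T] using h

-- ---- A-side: the two array passes compute Ulist / Dlist ----

theorem pvGetD {α : Type} (l : List α) (i : Nat) (d : α) (h : i < l.length) : l.getD i d = l[i] := by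
  simp [List.getD_eq_getElem?_getD, List.getElem?_eq_getElem h]

theorem pvGetDAppend {α : Type} (l1 l2 : List α) (i : Nat) (d : α) (h : i < l1.length) :
    (l1 ++ l2).getD i d = l1.getD i d := by
  rw [pvGetD _ _ _ (by simp; omega), pvGetD _ _ _ h]
  exact List.getElem_append_left h

theorem pvGetDAppendRight {α : Type} (l1 : List α) (a : α) (l2 : List α) (d : α) :
    (l1 ++ a :: l2).getD l1.length d = a := by
  rw [pvGetD _ _ _ (by simp)]
  rw [List.getElem_append_right (le_refl _)]
  simp

theorem len_Ulist (l : List Int) : ∀ prev c, (Ulist prev c l).length = l.length := by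
  induction l with
  | nil => intro prev c; rfl
  | cons z q ih => intro prev c; simp [Ulist, ih]

theorem len_Dlist (l : List Int) : (Dlist l).length = l.length := by
  induction l with
  | nil => rfl
  | cons z q ih => simp [Dlist, ih]

theorem Ulist_append (q : List Int) : ∀ prev c z y,
    Ulist prev c (z :: (q ++ [y])) =
      Ulist prev c (z :: q) ++ [if y > lastD (z :: q) then uLastF prev c (z :: q) + 1 else 1] := by
  induction q with
  | nil => intro prev c z y; by_cases h : y > z <;> simp [Ulist, uLastF, lastD, h]
  | cons w q' ih =>
    intro prev c z y
    simp only [List.cons_append]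
    rw [show Ulist prev c (z :: w :: (q' ++ [y])) =
        (if z > prev then c + 1 else 1) ::
          Ulist z (if z > prev then c + 1 else 1) (w :: (q' ++ [y])) from rfl]
    rw [ih z (if z > prev then c + 1 else 1) w y]
    rfl

theorem lastD_eq_getD (l : List Int) : lastD l = l.getD (l.length - 1) 0 := by
  induction l with
  | nil => rfl
  | cons z q ih =>
    cases q with
    | nil => rfl
    | cons w q' => simpa [lastD, List.length_cons] using ih

theorem Ulist_getD_last (q : List Int) : ∀ prev c z d,
    (Ulist prev c (z :: q)).getD ((z :: q).length - 1) d = uLastF prev c (z :: q) := by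
  induction q with
  | nil => intro prev c z d; simp [Ulist, uLastF]
  | cons w q' ih =>
    intro prev c z d
    rw [show Ulist prev c (z :: w :: q') =
        (if z > prev then c + 1 else 1) :: Ulist z (if z > prev then c + 1 else 1) (w :: q') from rfl]
    rw [show uLastF prev c (z :: w :: q') = uLastF z (if z > prev then c + 1 else 1) (w :: q') from rfl]
    have := ih z (if z > prev then c + 1 else 1) w d
    simpa [List.length_cons] using this

-- left-to-right pass: after processing range(1, k) the array is Ulist on take k, 1s beyond
theorem leftInv (x : Int) (t : List Int) : ∀ (k : Nat), 1 ≤ k → k ≤ (x :: t).length →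
    (PySem.List.pyRange 1 (k : Int) 1).foldl
      (fun lf i =>
        if PySem.List.pyGetD (x :: t) i 0 > PySem.List.pyGetD (x :: t) (i - 1) 0 then
          PySem.List.pySetD lf i (PySem.List.pyGetD lf (i - 1) 0 + 1)
        else lf)
      (List.replicate (x :: t).length 1) =
    Ulist x 0 ((x :: t).take k) ++ List.replicate ((x :: t).length - k) 1 := by
  have hlen : (x :: t).length = t.length + 1 := rfl
  intro k
  induction k with
  | zero => intro h1 _; omega
  | succ k ih =>
    intro _ h2
    by_cases hk : k = 0
    · subst hk
      norm_num
      simp [Ulist, List.replicate_succ]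
    · have hk1 : 1 ≤ k := by omega
      have hkn : k < (x :: t).length := by omega
      have hk1n : k - 1 < (x :: t).length := by omega
      have hr : PySem.List.pyRange 1 ((k + 1 : Nat) : Int) 1 =
          PySem.List.pyRange 1 (k : Int) 1 ++ [(k : Int)] := by
        rw [show ((k + 1 : Nat) : Int) = (k : Int) + 1 from by push_cast; ring]
        exact PySem.List.pyRange_one_succ_right (by exact_mod_cast hk1)
      rw [hr, List.foldl_append, ih hk1 (by omega)]
      simp only [List.foldl_cons, List.foldl_nil]
      have hcast : (k : Int) - 1 = ((k - 1 : Nat) : Int) := by omega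
      rw [hcast]
      simp only [PySem.List.pyGetD_natCast, PySem.List.pySetD_natCast]
      rw [pvGetD (x :: t) k 0 hkn, pvGetD (x :: t) (k - 1) 0 hk1n]
      have hlenU : (Ulist x 0 ((x :: t).take k)).length = k := by
        rw [len_Ulist]; simp [hlen]; omega
      have htk : (x :: t).take k = x :: t.take (k - 1) := by
        rw [show k = (k - 1) + 1 from by omega]; rfl
      have htake : (x :: t).take (k + 1) = (x :: t).take k ++ [(x :: t)[k]'hkn] := by
        rw [List.take_add_one]; simp [List.getElem?_eq_getElem hkn]
      have hlast : lastD ((x :: t).take k) = (x :: t)[k - 1]'hk1n := by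
        rw [lastD_eq_getD]
        have h1 : ((x :: t).take k).length = k := by simp [hlen]; omega
        rw [h1, pvGetD _ _ _ (by rw [h1]; omega)]
        simp
      have hgacc : (Ulist x 0 ((x :: t).take k) ++ List.replicate ((x :: t).length - k) 1).getD (k - 1) 0 =
          uLastF x 0 ((x :: t).take k) := by
        rw [pvGetDAppend _ _ _ _ (by omega)]
        have h2' := Ulist_getD_last (t.take (k - 1)) x 0 x 0
        have hlen2 : (x :: t.take (k - 1)).length = k := by simp; omega
        rw [hlen2] at h2'
        rw [htk]
        exact h2'
      have hrep : List.replicate ((x :: t).length - k) (1 : Int) =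
          1 :: List.replicate ((x :: t).length - (k + 1)) 1 := by
        rw [show (x :: t).length - k = ((x :: t).length - (k + 1)) + 1 from by omega,
            List.replicate_succ]
      rw [htake, htk]
      simp only [List.cons_append]
      rw [Ulist_append (t.take (k - 1)) x 0 x ((x :: t)[k]'hkn)]
      rw [← htk, hlast]
      by_cases hC : (x :: t)[k]'hkn > (x :: t)[k - 1]'hk1n
      · rw [if_pos hC, if_pos hC]
        rw [List.set_append_right _ _ (by simp [hlenU])]
        rw [hgacc, hlenU, Nat.sub_self, hrep]
        simp
      · rw [if_neg hC, if_neg hC, hrep]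
        simp

-- right-to-left pass: after processing range(L-1, j, -1) the array is Dlist on drop j, 1s before
theorem rightInv (x : Int) (t : List Int) (m : Nat) : ∀ (j : Nat), j + m + 1 = (x :: t).length →
    (PySem.List.pyRange (((x :: t).length : Int) - 1) (j : Int) (-1)).foldl
      (fun rt i =>
        if PySem.List.pyGetD (x :: t) (i - 1) 0 > PySem.List.pyGetD (x :: t) i 0 then
          PySem.List.pySetD rt (i - 1) (PySem.List.pyGetD rt i 0 + 1)
        else rt)
      (List.replicate (x :: t).length 1) =
    List.replicate j 1 ++ Dlist ((x :: t).drop j) := by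
  induction m with
  | zero =>
    intro j hj
    rw [show ((x :: t).length : Int) - 1 = (j : Int) from by omega]
    rw [PySem.List.pyRange_neg_one_eq_nil (le_refl _)]
    simp only [List.foldl_nil]
    have hd : (x :: t).drop j = [(x :: t)[j]'(by omega)] := by
      rw [List.drop_eq_getElem_cons (by omega)]
      rw [List.drop_eq_nil_of_le (by omega)]
    rw [hd]
    rw [show Dlist [(x :: t)[j]'(by omega)] = [1] from rfl]
    rw [show (x :: t).length = j + 1 from by omega]
    exact List.replicate_succ'
  | succ m ih =>
    intro j hj
    have hjn : (j : Int) + 1 < ((x :: t).length : Int) := by omega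
    have hj1n : j + 1 < (x :: t).length := by omega
    have hjn' : j < (x :: t).length := by omega
    have hsplit : PySem.List.pyRange (((x :: t).length : Int) - 1) (j : Int) (-1) =
        PySem.List.pyRange (((x :: t).length : Int) - 1) ((j + 1 : Nat) : Int) (-1) ++
          [((j + 1 : Nat) : Int)] := by
      rw [PySem.List.pyRange_neg_one_eq_reverse, PySem.List.pyRange_neg_one_eq_reverse]
      rw [show ((x :: t).length : Int) - 1 + 1 = ((x :: t).length : Int) from by ring]
      rw [PySem.List.pyRange_one_cons hjn]
      rw [List.reverse_cons]
      rw [show ((j + 1 : Nat) : Int) + 1 = (j : Int) + 1 + 1 from by push_cast; ring]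
      rw [show ((j + 1 : Nat) : Int) = (j : Int) + 1 from by push_cast; ring]
    rw [hsplit, List.foldl_append, ih (j + 1) (by omega)]
    simp only [List.foldl_cons, List.foldl_nil]
    have hcast : ((j + 1 : Nat) : Int) - 1 = (j : Int) := by push_cast; ring
    rw [hcast]
    simp only [PySem.List.pyGetD_natCast, PySem.List.pySetD_natCast]
    rw [pvGetD (x :: t) (j + 1) 0 hj1n, pvGetD (x :: t) j 0 hjn']
    have hlendrop : ((x :: t).drop (j + 1)).length = m + 1 := by
      rw [List.length_drop]; omega
    obtain ⟨a, l, hdrop⟩ : ∃ a l, (x :: t).drop (j + 1) = a :: l := by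
      cases hh : (x :: t).drop (j + 1) with
      | nil => rw [hh] at hlendrop; simp at hlendrop
      | cons a l => exact ⟨a, l, rfl⟩
    have ha : a = (x :: t)[j + 1]'hj1n := by
      have h5 := List.drop_eq_getElem_cons (l := x :: t) (i := j + 1) hj1n
      rw [hdrop] at h5
      injection h5 with h5a h5b
      try exact h5a
    have hgacc : (List.replicate (j + 1) (1 : Int) ++ Dlist ((x :: t).drop (j + 1))).getD (j + 1) 0 =
        dHead (a :: l) := by
      rw [hdrop]
      rw [show Dlist (a :: l) = dHead (a :: l) :: Dlist l from rfl]
      have h6 := pvGetDAppendRight (List.replicate (j + 1) (1 : Int)) (dHead (a :: l)) (Dlist l) 0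
      simp only [List.length_replicate] at h6
      exact h6
    have hrepl : List.replicate (j + 1) (1 : Int) = List.replicate j 1 ++ [1] :=
      List.replicate_succ'
    have hdropj : (x :: t).drop j = (x :: t)[j]'hjn' :: a :: l := by
      rw [List.drop_eq_getElem_cons hjn', hdrop]
    rw [hgacc, hdropj]
    rw [show Dlist ((x :: t)[j]'hjn' :: a :: l) =
        (if (x :: t)[j]'hjn' > a then dHead (a :: l) + 1 else 1) :: Dlist (a :: l) from rfl]
    rw [hdrop, hrepl, ← ha]
    by_cases hC : (x :: t)[j]'hjn' > a
    · rw [if_pos hC, if_pos hC]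
      rw [List.append_assoc]
      rw [List.set_append_right _ _ (by simp)]
      simp
    · rw [if_neg hC, if_neg hC]
      simp

theorem map_range_max (n : Nat) (a b : List Int) (ha : a.length = n) (hb : b.length = n) :
    (PySem.List.pyRange 0 (n : Int) 1).map
      (fun i => max (PySem.List.pyGetD a i 0) (PySem.List.pyGetD b i 0)) = List.zipWith max a b := by
  rw [PySem.List.pyRange_one]
  apply List.ext_getElem
  · simp [ha, hb]
  · intro i h1 h2
    have hi : i < n := by simp at h1; omega
    simp only [List.getElem_map, List.getElem_range, zero_add, PySem.List.pyGetD_natCast,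
      List.getElem_zipWith]
    rw [pvGetD a i 0 (by omega), pvGetD b i 0 (by omega)]

theorem a_eq_T (xs : List Int) : candyTwoArrays xs = T xs := by
  cases xs with
  | nil => rfl
  | cons x t =>
    have hlen : (x :: t).length = t.length + 1 := rfl
    simp only [candyTwoArrays]
    have hL := leftInv x t (x :: t).length (by omega) (le_refl _)
    have hR := rightInv x t ((x :: t).length - 1) 0 (by omega)
    simp only [Nat.cast_zero, List.replicate_zero, List.nil_append, List.drop_zero] at hR
    rw [hL, hR]
    rw [List.take_length, Nat.sub_self]
    simp only [List.replicate_zero, List.append_nil]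
    rw [map_range_max (x :: t).length _ _ (len_Ulist (x :: t) x 0) (len_Dlist (x :: t))]
    rw [← sM_eq_zip]
    rfl

-- ===== VERDICT (by name: the statement is the Claim_ definition above) =====
theorem candyTwoArrays_spec : Claim_equal_candyTwoArrays := by
  intro ratings _
  unfold Spec_candyTwoArrays
  rw [a_eq_T, alt_eq_T]
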